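-- pv_equiv track=rewrite | github.com/sherry-debug715/Algorithms-notes | test.py | highest_reachable_index
-- ===== SOURCE A (Python) =====
-- def highest_reachable_index(steps, bad_element):
--     # Initialize the dynamic programming table where dp[i][j] represents
--     # the highest index that can be reached at step i with a jump size of j.
--     # We need steps+2 rows because we start counting steps from 1, and we need anadditional row for step 0. We need steps+2 columns for the same reason.
--     dp = [[-1 for _ in range(steps + 2)] for _ in range(steps + 2)]
--
--     # Base case initialization, at step 0 we are at index 0 and jump size is 1
--     dp[0][1] = 0
--
--     # Fill the dp table
--     for i in range(1, steps + 1):  # For each step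
--         for j in range(1, i + 2):  # For each jump size
--             # We can either stay at the current index or jump from the index we were at in the previous step
--             stay = dp[i - 1][j]
--             jump = dp[i - 1][j - 1] + j if dp[i - 1][j - 1] != -1 else -1
--
--             # Choose the action that gives us the highest index, avoiding the bad element
--             dp[i][j] = max(stay, jump) if jump != bad_element else stay
--
--     # The result is the maximum index reached at the last step, ignoring the jump size
--     # as we want the highest index regardless of the jump size.
--     return max(dp[steps])
-- ===== SOURCE B (Python) =====
-- def highest_reachable_index(steps, bad_element):
--     # The jump sequence is forced: after k jumps we stand at 2, 5, 9, ... (triangular-1).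
--     # Walk it once; stop if the next landing spot is the forbidden one.
--     pos, jump = 0, 2
--     for _ in range(steps):
--         nxt = pos + jump
--         if nxt == bad_element:
--             break
--         pos, jump = nxt, jump + 1
--     return pos
-- ===== Notes on version B (the rewrite author's own statement) =====
-- stated objective: faster
-- what changed: Replaced the (steps+2)x(steps+2) DP table over (step, jump-size) by a single forward walk along the forced landing positions 2, 5, 9, ... (triangular numbers minus 1), stopping before the forbidden landing index.
import Mathlib
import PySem

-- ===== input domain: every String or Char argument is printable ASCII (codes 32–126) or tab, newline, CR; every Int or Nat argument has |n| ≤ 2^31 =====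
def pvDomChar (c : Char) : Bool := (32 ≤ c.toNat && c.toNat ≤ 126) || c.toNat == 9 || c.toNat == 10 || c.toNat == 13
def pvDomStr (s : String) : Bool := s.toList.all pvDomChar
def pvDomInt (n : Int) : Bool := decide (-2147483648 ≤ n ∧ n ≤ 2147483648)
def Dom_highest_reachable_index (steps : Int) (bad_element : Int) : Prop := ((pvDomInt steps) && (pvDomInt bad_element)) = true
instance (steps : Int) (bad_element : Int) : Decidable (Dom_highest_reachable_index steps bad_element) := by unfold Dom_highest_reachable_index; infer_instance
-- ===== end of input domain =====

-- B replaces A's O(steps^2) DP table by a single O(steps) walk along the forced landing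
-- positions 2, 5, 9, … (triangular-1), stopping before the forbidden landing index.

-- ===== PORT A =====
def pvA_get2 (dp : List (List Int)) (i j : Int) : Int :=
  PySem.List.pyGetD (PySem.List.pyGetD dp i []) j (-1)

def pvA_set2 (dp : List (List Int)) (i j : Int) (v : Int) : List (List Int) :=
  PySem.List.pySetD dp i (PySem.List.pySetD (PySem.List.pyGetD dp i []) j v)

def pvA_inner (bad_element : Int) (i : Int) (dp : List (List Int)) (j : Int) : List (List Int) :=
  let stay := pvA_get2 dp (i-1) j
  let jump := if pvA_get2 dp (i-1) (j-1) ≠ -1 then pvA_get2 dp (i-1) (j-1) + j else -1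
  pvA_set2 dp i j (if jump ≠ bad_element then max stay jump else stay)

def highest_reachable_index (steps : Int) (bad_element : Int) : Int :=
  let dp0 : List (List Int) :=
    (PySem.List.pyRange 0 (steps+2) 1).map (fun _ =>
      (PySem.List.pyRange 0 (steps+2) 1).map (fun _ => (-1 : Int)))
  let dp1 := pvA_set2 dp0 0 1 0
  let dp2 := (PySem.List.pyRange 1 (steps+1) 1).foldl (fun dp i =>
      (PySem.List.pyRange 1 (i+2) 1).foldl (pvA_inner bad_element i) dp) dp1
  (PySem.List.max? (PySem.List.pyGetD dp2 steps []) (fun y => y)).getD (-1)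

-- ===== PORT B =====
def pvB_step (bad_element : Int) (st : Int × Int × Bool) (_ : Int) : Int × Int × Bool :=
  if st.2.2 then st
  else if st.1 + st.2.1 = bad_element then (st.1, st.2.1, true)
  else (st.1 + st.2.1, st.2.1 + 1, false)

def highest_reachable_index_alt (steps : Int) (bad_element : Int) : Int :=
  ((PySem.List.pyRange 0 steps 1).foldl (pvB_step bad_element) (0, 2, false)).1

-- ===== PRECONDITION & SPEC =====
-- Pre_ excludes steps < 0, on which A raises IndexError (dp[0][1] = 0 on an empty row).
def Pre_highest_reachable_index (steps : Int) (bad_element : Int) : Prop := 0 ≤ steps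
instance (steps : Int) (bad_element : Int) : Decidable (Pre_highest_reachable_index steps bad_element) := by unfold Pre_highest_reachable_index; infer_instance
def pvWitness_highest_reachable_index : Int × Int := (4, 5)

def Spec_highest_reachable_index (steps : Int) (bad_element : Int) (out : Int) : Prop := out = highest_reachable_index_alt steps bad_element
instance (steps : Int) (bad_element : Int) (out : Int) : Decidable (Spec_highest_reachable_index steps bad_element out) := by unfold Spec_highest_reachable_index; infer_instance

-- ===== CLAIM (what is proved, stated in full; the proofs are below) =====
def Claim_equal_highest_reachable_index : Prop := ∀ (steps : Int) (bad_element : Int), Dom_highest_reachable_index steps bad_element → Pre_highest_reachable_index steps bad_element → Spec_highest_reachable_index steps bad_element (highest_reachable_index steps bad_element)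

-- ===== LEMMAS AND PROOFS =====

-- p k = position after k forced jumps (0, 2, 5, 9, … = triangular - 1)
def pvP : Nat → Int
  | 0 => 0
  | k+1 => pvP k + (k+2)

-- ok m ↔ none of the first m landing positions is forbidden
def pvOk (bad : Int) : Nat → Bool
  | 0 => true
  | m+1 => pvOk bad m && (pvP (m+1) != bad)

-- pvMs bad k n = jump count reached after n more steps, starting from k jumps
def pvMs (bad : Int) : Nat → Nat → Nat
  | k, 0 => k
  | k, n+1 => if pvP (k+1) = bad then k else pvMs bad (k+1) n

theorem pvP_nonneg (k : Nat) : 0 ≤ pvP k := by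
  induction k with
  | zero => simp [pvP]
  | succ k ih => simp only [pvP]; push_cast; omega

theorem pvP_mono {m k : Nat} (h : m ≤ k) : pvP m ≤ pvP k := by
  induction k with
  | zero => interval_cases m <;> simp
  | succ k ih =>
    rcases Nat.eq_or_lt_of_le h with rfl | hlt
    · exact le_refl _
    · have := ih (by omega)
      simp only [pvP]; push_cast; omega

theorem pvOk_of_le (bad : Int) {m k : Nat} (h : m ≤ k) (hk : pvOk bad k = true) : pvOk bad m = true := by
  induction k with
  | zero => interval_cases m; exact hk
  | succ k ih =>
    rcases Nat.eq_or_lt_of_le h with rfl | hlt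
    · exact hk
    · simp only [pvOk, Bool.and_eq_true] at hk
      exact ih (by omega) hk.1

theorem pvMs_le (bad : Int) (k n : Nat) : pvMs bad k n ≤ k + n := by
  induction n generalizing k with
  | zero => simp [pvMs]
  | succ n ih =>
    simp only [pvMs]
    split
    · omega
    · have := ih (k+1); omega

theorem pvOk_pvMs (bad : Int) (k n : Nat) (h : pvOk bad k = true) : pvOk bad (pvMs bad k n) = true := by
  induction n generalizing k with
  | zero => exact h
  | succ n ih =>
    simp only [pvMs]
    split
    · exact h
    · exact ih (k+1) (by simp [pvOk, h]; omega)

theorem pvMs_max (bad : Int) (n : Nat) : ∀ (k m : Nat), m ≤ k + n → pvOk bad m = true → m ≤ pvMs bad k n := by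
  induction n with
  | zero => intro k m hm _; simpa [pvMs] using hm
  | succ n ih =>
    intro k m hm hok
    simp only [pvMs]
    split
    · rename_i hbad
      by_contra hc
      have h1 : k + 1 ≤ m := by omega
      have := pvOk_of_le bad h1 hok
      simp only [pvOk, Bool.and_eq_true, bne_iff_ne, ne_eq] at this
      exact this.2 hbad
    · exact ih (k+1) m (by omega) hok

-- ===== B characterization =====

theorem pvB_done (bad : Int) (l : List Int) (st : Int × Int × Bool) (h : st.2.2 = true) :
    l.foldl (pvB_step bad) st = st := by
  induction l with
  | nil => rfl
  | cons x t ih => simpa [List.foldl_cons, pvB_step, h] using ih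

theorem pvB_run (bad : Int) (l : List Int) : ∀ (k : Nat),
    (l.foldl (pvB_step bad) (pvP k, (k:Int)+2, false)).1 = pvP (pvMs bad k l.length) := by
  induction l with
  | nil => intro k; simp [pvMs]
  | cons x t ih =>
    intro k
    have hstep : pvP k + ((k:Int)+2) = pvP (k+1) := by simp only [pvP]; try push_cast; try ring
    by_cases hb : pvP (k+1) = bad
    · have : pvB_step bad (pvP k, (k:Int)+2, false) x = (pvP k, (k:Int)+2, true) := by
        simp [pvB_step, hstep, hb]
      rw [List.foldl_cons, this, pvB_done bad t (pvP k, (k:Int)+2, true) rfl]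
      simp [pvMs, hb]
    · have : pvB_step bad (pvP k, (k:Int)+2, false) x = (pvP (k+1), ((k+1):Int)+2, false) := by
        simp [pvB_step, hstep, hb, Prod.ext_iff]
        push_cast
        omega
      rw [List.foldl_cons, this]
      have := ih (k+1)
      push_cast at this ⊢
      rw [this]
      simp [pvMs, hb]

theorem pvB_eq (steps bad : Int) (h : 0 ≤ steps) :
    highest_reachable_index_alt steps bad = pvP (pvMs bad 0 steps.toNat) := by
  unfold highest_reachable_index_alt
  have h0 : ((0:Int), (2:Int), false) = (pvP 0, ((0:Nat):Int)+2, false) := by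
    simp [pvP]
  rw [h0, pvB_run bad _ 0, PySem.List.length_pyRange_one]
  norm_num

-- ===== A characterization =====

def pvE (dp : List (List Int)) (r j : Nat) : Int := (dp.getD r []).getD j (-1)

def pvVal (bad : Int) (i j : Nat) : Int :=
  if 1 ≤ j ∧ j ≤ i + 1 ∧ pvOk bad (j-1) = true then pvP (j-1) else -1

def pvInvO (bad : Int) (N t : Nat) (dp : List (List Int)) : Prop :=
  dp.length = N ∧ (∀ r, r < N → (dp.getD r []).length = N) ∧
  (∀ j, j < N → pvE dp t j = pvVal bad t j) ∧
  (∀ r, t < r → r < N → ∀ j, j < N → pvE dp r j = -1)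

theorem pvStepVal (bad : Int) (iN jN : Nat) (h1 : 1 ≤ iN) (hj1 : 1 ≤ jN) (hj2 : jN ≤ iN + 1) :
    (let stay := pvVal bad (iN-1) jN
     let jb := pvVal bad (iN-1) (jN-1)
     let jump := if jb ≠ -1 then jb + (jN:Int) else -1
     if jump ≠ bad then max stay jump else stay) = pvVal bad iN jN := by
  simp only []
  rcases Nat.lt_or_ge jN 2 with hj | hj
  · -- jN = 1
    have hjeq : jN = 1 := by omega
    subst hjeq
    have hjb : pvVal bad (iN-1) 0 = -1 := by simp [pvVal]
    have hstay : pvVal bad (iN-1) 1 = 0 := by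
      have : pvOk bad 0 = true := rfl
      simp [pvVal, this, pvP]
    have hval : pvVal bad iN 1 = 0 := by
      have : pvOk bad 0 = true := rfl
      simp [pvVal, this, pvP]
    rw [hjb, hstay, hval]
    have hred : (if ((-1:Int) ≠ -1) then (-1:Int) + (1:Nat) else -1) = -1 := by simp
    rw [hred]
    split_ifs <;> simp
  · -- jN ≥ 2
    have hjb : pvVal bad (iN-1) (jN-1) = if pvOk bad (jN-2) = true then pvP (jN-2) else -1 := by
      simp only [pvVal]
      have h1 : 1 ≤ jN - 1 := by omega
      have h2 : jN - 1 ≤ (iN - 1) + 1 := by omega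
      have h3 : jN - 1 - 1 = jN - 2 := by omega
      rw [h3]
      split_ifs with hA hB hC <;> first | rfl | (exfalso; tauto)
    by_cases hok2 : pvOk bad (jN-2) = true
    · have hjbv : pvVal bad (iN-1) (jN-1) = pvP (jN-2) := by rw [hjb, if_pos hok2]
      have hjbne : pvVal bad (iN-1) (jN-1) ≠ -1 := by
        rw [hjbv]; have := pvP_nonneg (jN-2); omega
      have hjump : pvP (jN-2) + (jN:Int) = pvP (jN-1) := by
        have h4 : jN - 1 = (jN-2) + 1 := by omega
        rw [h4]
        simp only [pvP]
        have : ((jN - 2 : Nat) : Int) + 2 = (jN : Int) := by omega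
        omega
      rw [if_pos hjbne, hjbv, hjump]
      by_cases hbad : pvP (jN-1) = bad
      · -- forbidden landing: must stay, and stay is -1
        have hokf : pvOk bad (jN-1) = false := by
          have h4 : jN - 1 = (jN-2) + 1 := by omega
          rw [h4]
          simp [pvOk]
          intro _
          rw [← h4, hbad]
        have hstay : pvVal bad (iN-1) jN = -1 := by
          simp [pvVal, hokf]
        have hval : pvVal bad iN jN = -1 := by
          simp [pvVal, hokf]
        rw [if_neg (by simpa using hbad), hstay, hval]
      · have hokt : pvOk bad (jN-1) = true := by
          have h4 : jN - 1 = (jN-2) + 1 := by omega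
          rw [h4]
          simp [pvOk]
          exact ⟨hok2, by rw [← h4]; exact hbad⟩
        have hstay : pvVal bad (iN-1) jN = if jN ≤ iN then pvP (jN-1) else -1 := by
          unfold pvVal
          rcases Nat.lt_or_ge iN jN with hlt | hle
          · rw [if_neg (fun h => absurd h.2.1 (by omega : ¬ jN ≤ iN - 1 + 1)), if_neg (by omega)]
          · rw [if_pos ⟨hj1, by omega, hokt⟩, if_pos hle]
        have hval : pvVal bad iN jN = pvP (jN-1) := by
          unfold pvVal
          rw [if_pos ⟨hj1, hj2, hokt⟩]
        rw [if_pos hbad, hval, hstay]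
        have hnn := pvP_nonneg (jN-1)
        split_ifs with hc
        · exact max_self _
        · exact max_eq_right (by omega)
    · -- blocked earlier: everything is -1
      have hjbv : pvVal bad (iN-1) (jN-1) = -1 := by rw [hjb, if_neg hok2]
      have hokf : pvOk bad (jN-1) = false := by
        by_contra hc
        have hc' : pvOk bad (jN-1) = true := by
          cases h : pvOk bad (jN-1) <;> tauto
        exact hok2 (pvOk_of_le bad (by omega) hc')
      have hstay : pvVal bad (iN-1) jN = -1 := by simp [pvVal, hokf]
      have hval : pvVal bad iN jN = -1 := by simp [pvVal, hokf]
      rw [hjbv, hstay, hval]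
      have hred : (if ((-1:Int) ≠ -1) then (-1:Int) + (jN:Nat) else -1) = -1 := by simp
      rw [hred]
      split_ifs <;> simp


theorem pv_getD_set {α : Type} (l : List α) (n m : Nat) (a d : α) :
    (l.set n a).getD m d = if n = m ∧ n < l.length then a else l.getD m d := by
  by_cases h : n = m ∧ n < l.length
  · obtain ⟨rfl, hlt⟩ := h
    simp [List.getD_eq_getElem?_getD, hlt]
    try simp [List.getElem?_set, hlt]
  · rw [if_neg h]
    simp only [List.getD_eq_getElem?_getD, List.getElem?_set]
    by_cases he : n = m
    · subst he
      have hnl : ¬ n < l.length := fun hc => h ⟨rfl, hc⟩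
      simp only [if_neg hnl]
      rw [List.getElem?_eq_none (by omega)]
      simp
    · simp [he]

theorem pvA_get2_natCast (dp : List (List Int)) (r j : Nat) :
    pvA_get2 dp (r:Int) (j:Int) = pvE dp r j := by
  simp [pvA_get2, pvE]

theorem pvA_set2_natCast (dp : List (List Int)) (r j : Nat) (v : Int) :
    pvA_set2 dp (r:Int) (j:Int) v = dp.set r ((dp.getD r []).set j v) := by
  simp [pvA_set2]

def pvInnerFold (bad : Int) (iN : Nat) (dp : List (List Int)) (u : Nat) : List (List Int) :=
  (List.range u).foldl (fun d (k : Nat) => pvA_inner bad (iN:Int) d ((1:Int)+(k:Int))) dp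

def pvInnerP (bad : Int) (N iN : Nat) (dp dpu : List (List Int)) (u : Nat) : Prop :=
  dpu.length = N ∧ (∀ r, r < N → (dpu.getD r []).length = N) ∧
  (∀ r j, r < N → r ≠ iN → j < N → pvE dpu r j = pvE dp r j) ∧
  (∀ j, j < N → pvE dpu iN j = if 1 ≤ j ∧ j ≤ u then pvVal bad iN j else -1)

theorem pvVal_out (bad : Int) (i j : Nat) (h : ¬ (1 ≤ j ∧ j ≤ i + 1)) : pvVal bad i j = -1 := by
  unfold pvVal
  rw [if_neg (fun hc => h ⟨hc.1, hc.2.1⟩)]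

theorem pvInnerAux (bad : Int) (N iN : Nat) (hi : iN + 1 < N) (h1 : 1 ≤ iN) (dp : List (List Int))
    (h : pvInvO bad N (iN-1) dp) :
    ∀ u, u ≤ iN + 1 → pvInnerP bad N iN dp (pvInnerFold bad iN dp u) u := by
  obtain ⟨hlen, hrow, hprev, hhi⟩ := h
  intro u
  induction u with
  | zero =>
    intro _
    refine ⟨hlen, hrow, fun r j _ _ _ => rfl, fun j hj => ?_⟩
    simp only [Nat.le_zero]
    rw [if_neg (by omega)]
    exact hhi iN (by omega) (by omega) j hj
  | succ u ih =>
    intro hu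
    obtain ⟨plen, prow, pother, prowi⟩ := ih (by omega)
    have hfold : pvInnerFold bad iN dp (u+1)
        = pvA_inner bad (iN:Int) (pvInnerFold bad iN dp u) ((1:Int)+(u:Nat)) := by
      unfold pvInnerFold
      rw [List.range_succ, List.foldl_append]
      rfl
    set dpu := pvInnerFold bad iN dp u with hdpu
    have hc1 : (iN:Int) - 1 = ((iN-1 : Nat) : Int) := by omega
    have hc2 : (1:Int)+(u:Nat) = ((u+1 : Nat):Int) := by omega
    have hc4 : ((u+1 : Nat):Int) - 1 = ((u:Nat):Int) := by omega
    have hstay0 : pvA_get2 dpu ((iN:Int)-1) (((u+1) : Nat):Int) = pvVal bad (iN-1) (u+1) := by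
      rw [hc1, pvA_get2_natCast]
      rw [pother (iN-1) (u+1) (by omega) (by omega) (by omega)]
      exact hprev (u+1) (by omega)
    have hjb0 : pvA_get2 dpu ((iN:Int)-1) ((u:Nat):Int) = pvVal bad (iN-1) u := by
      rw [hc1, pvA_get2_natCast]
      rw [pother (iN-1) u (by omega) (by omega) (by omega)]
      exact hprev u (by omega)
    have hv2 := pvStepVal bad iN (u+1) h1 (by omega) (by omega)
    simp only [Nat.add_sub_cancel] at hv2
    have hstep : pvA_inner bad (iN:Int) dpu ((1:Int)+(u:Nat))
        = dpu.set iN ((dpu.getD iN []).set (u+1) (pvVal bad iN (u+1))) := by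
      simp only [pvA_inner]
      simp only [hc2, hc4, hstay0, hjb0]
      rw [pvA_set2_natCast]
      rw [hv2]
    rw [hfold, hstep]
    refine ⟨?_, ?_, ?_, ?_⟩
    · rw [List.length_set]; exact plen
    · intro r hr
      rw [pv_getD_set]
      split_ifs with hcase
      · rw [List.length_set]
        exact prow iN (by omega)
      · exact prow r hr
    · intro r j hr hne hj
      unfold pvE
      rw [pv_getD_set]
      rw [if_neg (fun hc => hne (hc.1.symm))]
      exact pother r j hr hne hj
    · intro j hj
      unfold pvE
      rw [pv_getD_set, if_pos ⟨rfl, by omega⟩]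
      rw [pv_getD_set]
      have hrl : (dpu.getD iN []).length = N := prow iN (by omega)
      by_cases hcj : u+1 = j
      · subst hcj
        rw [if_pos ⟨rfl, by omega⟩]
        rw [if_pos ⟨by omega, by omega⟩]
      · rw [if_neg (fun hc => hcj hc.1)]
        have hpj := prowi j hj
        unfold pvE at hpj
        rw [hpj]
        by_cases hj1 : 1 ≤ j ∧ j ≤ u
        · rw [if_pos hj1, if_pos ⟨hj1.1, by omega⟩]
        · rw [if_neg hj1, if_neg (fun hc => hj1 ⟨hc.1, by omega⟩)]
  

theorem pvInner (bad : Int) (N iN : Nat) (hi : iN + 1 < N) (h1 : 1 ≤ iN) (dp : List (List Int))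
    (h : pvInvO bad N (iN-1) dp) :
    pvInvO bad N iN ((PySem.List.pyRange 1 ((iN:Int)+2) 1).foldl (pvA_inner bad (iN:Int)) dp) := by
  obtain ⟨hlen0, hrow0, hprev0, hhi0⟩ := h
  have haux := pvInnerAux bad N iN hi h1 dp ⟨hlen0, hrow0, hprev0, hhi0⟩ (iN+1) (le_refl _)
  obtain ⟨hlen, hrowP, pother, prowi⟩ := haux
  have hfold : (PySem.List.pyRange 1 ((iN:Int)+2) 1).foldl (pvA_inner bad (iN:Int)) dp
      = pvInnerFold bad iN dp (iN+1) := by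
    have hrange : PySem.List.pyRange 1 ((iN:Int)+2) 1
        = (List.range (iN+1)).map (fun (k : Nat) => (1:Int)+(k:Int)) := by
      rw [PySem.List.pyRange_one]
      have hT : ((iN:Int)+2-1).toNat = iN+1 := by omega
      rw [hT]
    rw [hrange, List.foldl_map]
    rfl
  rw [hfold]
  refine ⟨hlen, hrowP, ?_, ?_⟩
  · intro j hj
    rw [prowi j hj]
    by_cases hc : 1 ≤ j ∧ j ≤ iN+1
    · rw [if_pos hc]
    · rw [if_neg hc]
      exact (pvVal_out bad iN j hc).symm
  · intro r hr hrN j hj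
    rw [pother r j hrN (by omega) hj]
    exact hhi0 r (by omega) hrN j hj

theorem pvOuter (bad : Int) (N : Nat) (dp1 : List (List Int)) (h0 : pvInvO bad N 0 dp1) :
    ∀ t, t + 1 < N → pvInvO bad N t
      (((List.range t).map (fun (k : Nat) => (1:Int)+(k:Int))).foldl (fun dp i =>
        (PySem.List.pyRange 1 (i+2) 1).foldl (pvA_inner bad i) dp) dp1) := by
  intro t
  induction t with
  | zero =>
    intro _
    simpa using h0
  | succ t ih =>
    intro ht
    rw [List.range_succ, List.map_append, List.foldl_append]
    simp only [List.map_cons, List.map_nil, List.foldl_cons, List.foldl_nil]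
    have hprev := ih (by omega)
    have hcast : (1:Int)+(t:Int) = (((t+1):Nat):Int) := by omega
    rw [hcast]
    exact pvInner bad N (t+1) (by omega) (by omega) _ hprev

theorem pvA_eq (steps bad : Int) (h : 0 ≤ steps) :
    highest_reachable_index steps bad = pvP (pvMs bad 0 steps.toNat) := by
  unfold highest_reachable_index
  simp only []
  set S := steps.toNat with hS
  have hsteps : steps = (S:Int) := by omega
  set N := S + 2 with hN
  set row0 : List Int := (PySem.List.pyRange 0 (steps+2) 1).map (fun _ => (-1:Int)) with hrow0def
  set dp0 : List (List Int) := (PySem.List.pyRange 0 (steps+2) 1).map (fun _ => row0) with hdp0def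
  have hlenrange : (PySem.List.pyRange 0 (steps+2) 1).length = N := by
    rw [PySem.List.length_pyRange_one]
    omega
  have hrow0 : row0 = List.replicate N (-1) := by
    rw [hrow0def, List.map_const']
    rw [hlenrange]
  have hdp0 : dp0 = List.replicate N row0 := by
    rw [hdp0def, List.map_const']
    rw [hlenrange]
  have hget0 : ∀ r, r < N → dp0.getD r [] = row0 := by
    intro r hr
    rw [hdp0]
    simp [List.getD_eq_getElem?_getD, List.getElem?_replicate, hr]
  have hset : pvA_set2 dp0 (0:Int) (1:Int) 0 = dp0.set 0 ((dp0.getD 0 []).set 1 0) :=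
    pvA_set2_natCast dp0 0 1 0
  have hinv0 : pvInvO bad N 0 (dp0.set 0 ((dp0.getD 0 []).set 1 0)) := by
    have hg0 : dp0.getD 0 [] = row0 := hget0 0 (by omega)
    refine ⟨?_, ?_, ?_, ?_⟩
    · rw [List.length_set, hdp0, List.length_replicate]
    · intro r hr
      rw [pv_getD_set]
      split_ifs with hc
      · rw [List.length_set, hg0, hrow0, List.length_replicate]
      · rw [hget0 r hr, hrow0, List.length_replicate]
    · intro j hj
      unfold pvE
      rw [pv_getD_set, if_pos ⟨rfl, by rw [hdp0, List.length_replicate]; omega⟩, hg0]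
      rw [pv_getD_set]
      have hr0len : row0.length = N := by rw [hrow0, List.length_replicate]
      have hrepl : ∀ m : Nat, row0.getD m (-1) = -1 := by
        intro m
        rw [hrow0]
        simp [List.getD_eq_getElem?_getD, List.getElem?_replicate]
        split_ifs <;> simp
      by_cases hc : j = 1
      · subst hc
        rw [if_pos ⟨rfl, by omega⟩]
        unfold pvVal
        rw [if_pos ⟨by omega, by omega, rfl⟩]
        rfl
      · rw [if_neg (fun hcc => hc hcc.1.symm), hrepl j]
        unfold pvVal
        rw [if_neg (by omega)]
    · intro r hr hrN j hj
      unfold pvE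
      rw [pv_getD_set, if_neg (by omega), hget0 r hrN]
      rw [hrow0]
      simp [List.getD_eq_getElem?_getD, List.getElem?_replicate]
      split_ifs <;> simp
  have hrange2 : PySem.List.pyRange 1 (steps+1) 1 = (List.range S).map (fun (k : Nat) => (1:Int)+(k:Int)) := by
    rw [PySem.List.pyRange_one]
    have hT : (steps+1-1).toNat = S := by omega
    rw [hT]
  rw [hset, hrange2]
  have hInv := pvOuter bad N _ hinv0 S (by omega)
  obtain ⟨hlen2, hrow2, hentry2, _⟩ := hInv
  set dp2 := ((List.range S).map (fun (k : Nat) => (1:Int)+(k:Int))).foldl (fun dp i =>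
        (PySem.List.pyRange 1 (i+2) 1).foldl (pvA_inner bad i) dp) (dp0.set 0 ((dp0.getD 0 []).set 1 0)) with hdp2
  rw [hsteps]
  have hgetS : PySem.List.pyGetD dp2 ((S:Nat):Int) [] = dp2.getD S [] := by simp
  rw [hgetS]
  set row := dp2.getD S [] with hrowdef
  have hrl : row.length = N := hrow2 S (by omega)
  have hre : ∀ j, j < N → row.getD j (-1) = pvVal bad S j := fun j hj => hentry2 j hj
  set M := pvMs bad 0 S with hM
  have hMle : M ≤ S := by
    have := pvMs_le bad 0 S
    omega
  have hMok : pvOk bad M = true := pvOk_pvMs bad 0 S rfl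
  have key1 : row.getD (M+1) (-1) = pvP M := by
    rw [hre (M+1) (by omega)]
    unfold pvVal
    rw [if_pos ⟨by omega, by omega, hMok⟩]
    norm_num
  have key2 : ∀ j, j < N → row.getD j (-1) ≤ pvP M := by
    intro j hj
    rw [hre j hj]
    unfold pvVal
    split_ifs with hc
    · exact pvP_mono (pvMs_max bad S 0 (j-1) (by omega) hc.2.2)
    · have := pvP_nonneg M
      omega
  have hne : row ≠ [] := by
    intro hc
    rw [hc] at hrl
    simp at hrl
  obtain ⟨m, hm⟩ : ∃ m, PySem.List.max? row (fun y => y) = some m := by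
    cases hmm : PySem.List.max? row (fun y => y) with
    | none => exact absurd ((PySem.List.max?_eq_none_iff row (fun y => y)).mp hmm) hne
    | some m => exact ⟨m, rfl⟩
  have hmem := PySem.List.max?_mem hm
  have hmax := PySem.List.max?_isMax hm
  have hup : m ≤ pvP M := by
    obtain ⟨j, hj, hjm⟩ := List.mem_iff_getElem.mp hmem
    have : row.getD j (-1) = m := by
      rw [List.getD_eq_getElem row (-1) hj, hjm]
    rw [← this]
    exact key2 j (by omega)
  have hlow : pvP M ≤ m := by
    have hMlt : M + 1 < row.length := by omega
    have : row[M+1] ∈ row := List.getElem_mem hMlt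
    have h2 := hmax _ this
    rw [← List.getD_eq_getElem row (-1) hMlt, key1] at h2
    exact h2
  rw [hm]
  simp
  omega

-- ===== VERDICT (by name: the statement is the Claim_ definition above) =====
theorem highest_reachable_index_spec : Claim_equal_highest_reachable_index := by
  intro steps bad _ hpre
  unfold Spec_highest_reachable_index
  rw [pvA_eq steps bad hpre, pvB_eq steps bad hpre]
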